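-- pv_equiv track=rewrite | github.com/mmenaka24/RerequestingAVanityPlate | plates.py | numbers_only_at_end_and_no_leading_zero
-- ===== SOURCE A (Python) =====
-- def numbers_only_at_end_and_no_leading_zero(s):
--
--     # find first number
--
--     for i in range(len(s)):
--         char = s[i]
--
--         # check it's not 0 and no letters after
--         if char.isnumeric():
--             if char == "0":
--                 return False
--             return s[i:].isnumeric()
--
--     # if no numbers assume valid
--     return True
-- ===== SOURCE B (Python) =====
-- def numbers_only_at_end_and_no_leading_zero(s):
--     # find start of the maximal trailing numeric run by scanning from the right
--     j = len(s)
--     while j > 0 and s[j - 1].isnumeric():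
--         j -= 1
--     # valid iff no digit before the run and the run does not start with '0'
--     if any(c.isnumeric() for c in s[:j]):
--         return False
--     return j == len(s) or s[j] != "0"
-- ===== Notes on version B (the rewrite author's own statement) =====
-- stated objective: alternative
-- what changed: B scans from the right end to find the maximal trailing numeric run, then checks that the prefix contains no digit and that the run does not start with a zero character, instead of A's left-to-right scan for the first digit followed by an isnumeric test of the whole tail.
import Mathlib
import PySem

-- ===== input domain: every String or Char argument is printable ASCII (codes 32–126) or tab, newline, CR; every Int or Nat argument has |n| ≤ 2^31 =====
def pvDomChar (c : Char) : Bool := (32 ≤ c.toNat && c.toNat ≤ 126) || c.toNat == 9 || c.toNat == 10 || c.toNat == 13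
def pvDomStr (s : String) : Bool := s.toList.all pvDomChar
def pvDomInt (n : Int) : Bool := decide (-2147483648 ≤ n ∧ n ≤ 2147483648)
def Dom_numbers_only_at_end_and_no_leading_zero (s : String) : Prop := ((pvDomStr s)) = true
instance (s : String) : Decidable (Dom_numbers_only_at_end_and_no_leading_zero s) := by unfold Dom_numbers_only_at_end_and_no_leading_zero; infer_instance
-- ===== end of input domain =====

-- B replaces A's left-to-right scan for the first digit by a right-to-left scan for the
-- trailing numeric run plus a digit-free-prefix check (alternative decomposition, same cost).
-- Python's .isnumeric() is ported as PySem.Chars.isdigit / strIsdigit, exact on the ASCII Dom.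

-- ===== PORT A =====
-- the 'for i in range(len(s))' loop: inspect the head of each suffix in turn
def pvGoA : List Char → Bool
  | [] => true                                   -- loop fell through: no numbers, assume valid
  | c :: rest =>
      if PySem.Chars.isdigit c then
        (if c = '0' then false
         else PySem.Chars.strIsdigit (c :: rest))  -- s[i:].isnumeric()
      else pvGoA rest

def numbers_only_at_end_and_no_leading_zero (s : String) : Bool := pvGoA s.toList

-- ===== PORT B =====
-- the 'while j > 0 and s[j-1].isnumeric(): j -= 1' loop, run over the reversed list:
-- counts how many characters the loop strips from the right
def pvTrail : List Char → Nat
  | [] => 0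
  | c :: rest => if PySem.Chars.isdigit c then pvTrail rest + 1 else 0

def pvAltB (l : List Char) : Bool :=
  let j := l.length - pvTrail l.reverse
  if (l.take j).any PySem.Chars.isdigit then false   -- any(c.isnumeric() for c in s[:j])
  else match l.drop j with                           -- j == len(s) or s[j] != "0"
    | [] => true
    | c :: _ => c ≠ '0'

def numbers_only_at_end_and_no_leading_zero_alt (s : String) : Bool := pvAltB s.toList

-- ===== PRECONDITION & SPEC =====
def Spec_numbers_only_at_end_and_no_leading_zero (s : String) (out : Bool) : Prop := out = numbers_only_at_end_and_no_leading_zero_alt s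
instance (s : String) (out : Bool) : Decidable (Spec_numbers_only_at_end_and_no_leading_zero s out) := by unfold Spec_numbers_only_at_end_and_no_leading_zero; infer_instance

-- ===== CLAIM (what is proved, stated in full; the proofs are below) =====
def Claim_equal_numbers_only_at_end_and_no_leading_zero : Prop := ∀ (s : String), Dom_numbers_only_at_end_and_no_leading_zero s → Spec_numbers_only_at_end_and_no_leading_zero s (numbers_only_at_end_and_no_leading_zero s)

-- ===== LEMMAS AND PROOFS =====

theorem pvTrail_le (xs : List Char) : pvTrail xs ≤ xs.length := by
  induction xs with
  | nil => simp [pvTrail]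
  | cons c rest ih => simp only [pvTrail, List.length_cons]; split_ifs <;> omega

theorem pvTrail_eq_length_iff (xs : List Char) :
    pvTrail xs = xs.length ↔ xs.all PySem.Chars.isdigit = true := by
  induction xs with
  | nil => simp [pvTrail]
  | cons c rest ih =>
    simp only [pvTrail, List.length_cons, List.all_cons, Bool.and_eq_true]
    have hle := pvTrail_le rest
    split_ifs with h
    · constructor
      · intro he; exact ⟨h, ih.mp (by omega)⟩
      · rintro ⟨_, ha⟩; have := ih.mpr ha; omega
    · constructor
      · intro he; exact he.elim
      · rintro ⟨hc, _⟩; exact absurd hc h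

theorem pvTrail_append_single (xs : List Char) (c : Char) :
    pvTrail (xs ++ [c]) =
      if pvTrail xs = xs.length then xs.length + pvTrail [c] else pvTrail xs := by
  induction xs with
  | nil => simp [pvTrail]
  | cons d rest ih =>
    simp only [List.cons_append, pvTrail, List.length_cons]
    have hle := pvTrail_le rest
    split_ifs with hd h1 h2 h2 <;> simp_all [pvTrail]

theorem pvTrail_reverse_eq_length_iff (l : List Char) :
    pvTrail l.reverse = l.length ↔ l.all PySem.Chars.isdigit = true := by
  rw [show l.length = l.reverse.length by simp, pvTrail_eq_length_iff]
  simp [List.all_reverse]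

theorem pvGoA_eq_pvAltB (l : List Char) : pvGoA l = pvAltB l := by
  induction l with
  | nil => simp [pvGoA, pvAltB, pvTrail]
  | cons c rest ih =>
    by_cases hd : PySem.Chars.isdigit c = true
    · simp only [pvGoA, hd, if_true]
      by_cases hall : (c :: rest).all PySem.Chars.isdigit = true
      · -- whole string is digits: j = 0
        have hk : pvTrail (c :: rest).reverse = (c :: rest).length :=
          (pvTrail_reverse_eq_length_iff _).mpr hall
        simp only [pvAltB, hk, Nat.sub_self, List.take_zero, List.any_nil,
          Bool.false_eq_true, if_false, List.drop_zero]
        by_cases hc0 : c = '0'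
        · simp [hc0]
        · simp only [hc0, if_false]
          simp only [PySem.Chars.strIsdigit]
          simp_all
      · -- a non-digit exists: j ≥ 1, the prefix contains the digit c
        have hk : pvTrail (c :: rest).reverse ≠ (c :: rest).length :=
          fun h => hall ((pvTrail_reverse_eq_length_iff _).mp h)
        have hle : pvTrail (c :: rest).reverse ≤ (c :: rest).length := by
          simpa using pvTrail_le (c :: rest).reverse
        have hlt : pvTrail (c :: rest).reverse < (c :: rest).length := lt_of_le_of_ne hle hk
        obtain ⟨m, hm⟩ : ∃ m, (c :: rest).length - pvTrail (c :: rest).reverse = m + 1 :=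
          ⟨(c :: rest).length - pvTrail (c :: rest).reverse - 1, by omega⟩
        have htake : ((c :: rest).take ((c :: rest).length - pvTrail (c :: rest).reverse)).any
            PySem.Chars.isdigit = true := by
          rw [hm]; simp [List.take_succ_cons, hd]
        simp only [pvAltB, htake, if_true]
        -- pvGoA side: strIsdigit is false since not all are digits
        by_cases hc0 : c = '0'
        · simp [hc0]
        · simp only [hc0, if_false, PySem.Chars.strIsdigit]
          simp_all
    · -- c is not a digit: both sides step to rest
      have hrev : pvTrail (c :: rest).reverse = pvTrail rest.reverse := by
        have : (c :: rest).reverse = rest.reverse ++ [c] := by simp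
        rw [this, pvTrail_append_single]
        have h1 : pvTrail [c] = 0 := by simp [pvTrail, hd]
        rw [h1]
        rcases eq_or_ne (pvTrail rest.reverse) rest.reverse.length with h | h
        · rw [if_pos h]; omega
        · rw [if_neg h]
      have hle : pvTrail rest.reverse ≤ rest.length := by
        simpa using pvTrail_le rest.reverse
      obtain ⟨k, hk, hkle⟩ : ∃ k, pvTrail rest.reverse = k ∧ k ≤ rest.length := ⟨_, rfl, hle⟩
      have hj : (c :: rest).length - pvTrail (c :: rest).reverse
          = (rest.length - k) + 1 := by
        rw [hrev, hk]; simp only [List.length_cons]; omega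
      have hgoA : pvGoA (c :: rest) = pvGoA rest := by simp [pvGoA, hd]
      rw [hgoA, ih]
      simp only [pvAltB, hj, List.take_succ_cons, List.drop_succ_cons, List.any_cons, hk]
      simp [hd]

-- ===== VERDICT (by name: the statement is the Claim_ definition above) =====
theorem numbers_only_at_end_and_no_leading_zero_spec : Claim_equal_numbers_only_at_end_and_no_leading_zero := by
  intro s _
  unfold Spec_numbers_only_at_end_and_no_leading_zero numbers_only_at_end_and_no_leading_zero numbers_only_at_end_and_no_leading_zero_alt
  exact pvGoA_eq_pvAltB s.toList
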